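-- pv_equiv track=rewrite | github.com/MahakG/SemEval-16 | codi/tokenize/twitter_ELiRF.py | extract_nchars
-- ===== SOURCE A (Python) =====
-- def extract_nchars(sentence, n=3, uni=False, fill='<SPACE>'):
--     nchars = []
--     spt = sentence.split()
--     for word in spt:
--         L = len(word)
--         i=0
--         if uni:
--             j=1
--         else:
--             j=min(L,n)
--         while j <= L:
--             ph = word[i:j]
--             nchars.append(ph)
--             j += 1
--             if j-i-1 == n:
--                 i += 1
--         nchars.append(fill)
--     return nchars[:-1]
-- ===== SOURCE B (Python) =====
-- def extract_nchars(sentence, n=3, uni=False, fill='<SPACE>'):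
--     out = []
--     for word in sentence.split():
--         if out:
--             out.append(fill)
--         buf = ''
--         emitted = False
--         for c in word:
--             buf += c
--             if n > 0 and len(buf) > n:
--                 buf = buf[1:]
--             if uni or len(buf) == n:
--                 out.append(buf)
--                 emitted = True
--         if not uni and not emitted:
--             out.append(buf)
--     return out
-- ===== Notes on version B (the rewrite author's own statement) =====
-- stated objective: alternative
-- what changed: B replaces A's index-arithmetic slicing (a while loop over window ends with an incrementally maintained start pointer and word[i:j] slices) by a streaming character scan that maintains the current window as a buffer (append a char, drop the head once the buffer exceeds n, emit the buffer), with a fallback emitting the whole word when the window never filled, and inserts the separator before each word after the first instead of appending it after every word and slicing off the last.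
-- intended difference: On non-uni calls with n <= 0 and at least one word, A returns accidental raw-index slices (mostly empty strings, e.g. ['','',''] for ('ab',0,False)) while B returns each whole word (['ab']), the same value A itself gives for words shorter than the window, which is the intended reading of a degenerate window size. — e.g. on extract_nchars("ab", 0, false, "<SPACE>"): A returns ["", "", ""], B returns ["ab"]
import Mathlib
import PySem

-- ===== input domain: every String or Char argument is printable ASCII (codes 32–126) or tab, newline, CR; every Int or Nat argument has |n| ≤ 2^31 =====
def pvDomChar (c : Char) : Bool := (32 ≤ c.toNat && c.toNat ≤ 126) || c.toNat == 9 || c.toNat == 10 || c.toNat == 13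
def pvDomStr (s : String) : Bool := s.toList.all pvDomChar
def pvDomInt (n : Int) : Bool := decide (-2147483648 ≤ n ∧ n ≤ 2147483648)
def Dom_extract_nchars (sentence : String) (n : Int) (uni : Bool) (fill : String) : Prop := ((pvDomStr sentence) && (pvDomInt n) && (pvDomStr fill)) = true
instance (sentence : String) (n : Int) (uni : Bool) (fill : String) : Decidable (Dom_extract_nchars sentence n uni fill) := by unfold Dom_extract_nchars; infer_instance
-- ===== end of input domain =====

-- B replaces A's index-arithmetic slicing (a while loop over window ends with an
-- incrementally maintained start pointer) by a streaming character scan that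
-- maintains the current window as a buffer and emits it, with the separator put
-- before each word after the first; alternative algorithm, same cost.

-- ===== PORT A =====
-- the 'while j <= L' loop of A, state (i, j, acc)
def extract_nchars_whileA (word : String) (L n : Int) : Nat → Int → Int → List String → List String
  | 0, _, _, acc => acc
  | Nat.succ fuel, i, j, acc =>
    if j ≤ L then
      extract_nchars_whileA word L n fuel (if j + 1 - i - 1 = n then i + 1 else i) (j + 1)
        (acc ++ [PySem.Str.slice word (some i) (some j)])
    else acc

def extract_nchars (sentence : String) (n : Int) (uni : Bool) (fill : String) : List String :=
  let spt := PySem.Str.split₀ sentence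
  let nchars := spt.foldl (fun acc word =>
    let L := PySem.Str.len word
    let j := if uni then 1 else min L n
    (extract_nchars_whileA word L n (L + 1 - j).toNat 0 j acc) ++ [fill]) ([] : List String)
  PySem.List.slice nchars none (some (-1))

-- ===== PORT B =====
-- the body of Source B's inner 'for c in word' loop, state (buf, emitted, out);
-- the Python str buffer is ported on the List Char side (PySem.Chars convention)
def extract_nchars_altStep (n : Int) (uni : Bool) (st : List Char × Bool × List String) (c : Char) : List Char × Bool × List String :=
  let buf := st.1 ++ [c]                                              -- buf += c
  let buf := if 0 < n ∧ n < (buf.length : Int) then buf.tail else buf -- if n > 0 and len(buf) > n: buf = buf[1:]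
  if uni = true ∨ (buf.length : Int) = n then (buf, true, st.2.2 ++ [String.ofList buf])
  else (buf, st.2.1, st.2.2)

-- one iteration of Source B's outer 'for word in sentence.split()' loop
def extract_nchars_altWord (n : Int) (uni : Bool) (fill : String) (out : List String) (word : String) : List String :=
  let out' := if out.isEmpty then out else out ++ [fill]
  let st := word.toList.foldl (extract_nchars_altStep n uni) (([] : List Char), false, out')
  if uni = false ∧ st.2.1 = false then st.2.2 ++ [String.ofList st.1] else st.2.2

def extract_nchars_alt (sentence : String) (n : Int) (uni : Bool) (fill : String) : List String :=
  (PySem.Str.split₀ sentence).foldl (extract_nchars_altWord n uni fill) []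

-- ===== PRECONDITION & SPEC =====
-- On non-uni calls with n <= 0 (a degenerate n-gram size) A returns a list of
-- accidental slices (mostly empty strings) produced by its raw index arithmetic,
-- while B returns each whole word — the same value A itself returns for any word
-- shorter than the window, which is the intended reading of a degenerate window.
def D_extract_nchars (sentence : String) (n : Int) (uni : Bool) (fill : String) : Prop :=
  uni = false ∧ n ≤ 0 ∧ PySem.Str.split₀ sentence ≠ []
instance (sentence : String) (n : Int) (uni : Bool) (fill : String) : Decidable (D_extract_nchars sentence n uni fill) := by unfold D_extract_nchars; infer_instance

def Spec_extract_nchars (sentence : String) (n : Int) (uni : Bool) (fill : String) (out : List String) : Prop := ¬ D_extract_nchars sentence n uni fill → out = extract_nchars_alt sentence n uni fill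
instance (sentence : String) (n : Int) (uni : Bool) (fill : String) (out : List String) : Decidable (Spec_extract_nchars sentence n uni fill out) := by unfold Spec_extract_nchars; infer_instance

def pvDiffWitness_extract_nchars : String × Int × Bool × String := ("ab", 0, false, "<SPACE>")
def pvDiffWitnessOut_extract_nchars : (List String) × (List String) := (["", "", ""], ["ab"])

-- ===== CLAIM (what is proved, stated in full; the proofs are below) =====
def Claim_unchanged_extract_nchars : Prop := ∀ (sentence : String) (n : Int) (uni : Bool) (fill : String), Dom_extract_nchars sentence n uni fill → Spec_extract_nchars sentence n uni fill (extract_nchars sentence n uni fill)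
def Claim_changed_extract_nchars : Prop := Dom_extract_nchars (pvDiffWitness_extract_nchars.1) (pvDiffWitness_extract_nchars.2.1) (pvDiffWitness_extract_nchars.2.2.1) (pvDiffWitness_extract_nchars.2.2.2) ∧ D_extract_nchars (pvDiffWitness_extract_nchars.1) (pvDiffWitness_extract_nchars.2.1) (pvDiffWitness_extract_nchars.2.2.1) (pvDiffWitness_extract_nchars.2.2.2) ∧ extract_nchars (pvDiffWitness_extract_nchars.1) (pvDiffWitness_extract_nchars.2.1) (pvDiffWitness_extract_nchars.2.2.1) (pvDiffWitness_extract_nchars.2.2.2) = pvDiffWitnessOut_extract_nchars.1 ∧ extract_nchars_alt (pvDiffWitness_extract_nchars.1) (pvDiffWitness_extract_nchars.2.1) (pvDiffWitness_extract_nchars.2.2.1) (pvDiffWitness_extract_nchars.2.2.2) = pvDiffWitnessOut_extract_nchars.2 ∧ pvDiffWitnessOut_extract_nchars.1 ≠ pvDiffWitnessOut_extract_nchars.2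
def Claim_exact_extract_nchars : Prop := ∀ (sentence : String) (n : Int) (uni : Bool) (fill : String), Dom_extract_nchars sentence n uni fill → D_extract_nchars sentence n uni fill → extract_nchars sentence n uni fill ≠ extract_nchars_alt sentence n uni fill

-- ===== LEMMAS AND PROOFS =====

-- A's per-word n-gram list, as a map over the range of window ends
def gramsA (word : String) (n : Int) (uni : Bool) : List String :=
  (PySem.List.pyRange (if uni then 1 else min (PySem.Str.len word) n) (PySem.Str.len word + 1) 1).map
    (fun e => PySem.Str.slice word (some (if uni = true ∧ n ≤ 0 then 0 else max 0 (e - n))) (some e))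

-- A's while loop, flat case (uni with n < j): the guard never fires, i stays 0
theorem whileA_flat (word : String) (L n : Int) :
    ∀ fuel j acc, (L + 1 - j).toNat ≤ fuel → n < j →
      extract_nchars_whileA word L n fuel 0 j acc
        = acc ++ (PySem.List.pyRange j (L + 1) 1).map (fun e => PySem.Str.slice word (some 0) (some e)) := by
  intro fuel
  induction fuel with
  | zero =>
    intro j acc hf hn
    simp only [extract_nchars_whileA]
    rw [PySem.List.pyRange_one_eq_nil (by omega)]
    simp
  | succ m ih =>
    intro j acc hf hn
    by_cases h : j ≤ L
    · simp only [extract_nchars_whileA]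
      rw [if_pos h]
      have hguard : ¬ (j + 1 - 0 - 1 = n) := by omega
      rw [if_neg hguard]
      rw [ih (j + 1) (acc ++ [PySem.Str.slice word (some 0) (some j)]) (by omega) (by omega)]
      rw [PySem.List.pyRange_one_cons (show j < L + 1 by omega)]
      simp
    · simp only [extract_nchars_whileA]
      rw [if_neg h, PySem.List.pyRange_one_eq_nil (by omega)]
      simp

-- A's while loop, sliding case: i = max 0 (j - n) is an invariant
theorem whileA_slide (word : String) (L n : Int) :
    ∀ fuel j acc, (L + 1 - j).toNat ≤ fuel →
      extract_nchars_whileA word L n fuel (max 0 (j - n)) j acc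
        = acc ++ (PySem.List.pyRange j (L + 1) 1).map (fun e => PySem.Str.slice word (some (max 0 (e - n))) (some e)) := by
  intro fuel
  induction fuel with
  | zero =>
    intro j acc hf
    simp only [extract_nchars_whileA]
    rw [PySem.List.pyRange_one_eq_nil (by omega)]
    simp
  | succ m ih =>
    intro j acc hf
    by_cases h : j ≤ L
    · simp only [extract_nchars_whileA]
      rw [if_pos h]
      have hstep : (if j + 1 - max 0 (j - n) - 1 = n then max 0 (j - n) + 1 else max 0 (j - n))
          = max 0 (j + 1 - n) := by
        split_ifs with hg <;> omega
      rw [hstep]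
      rw [ih (j + 1) (acc ++ [PySem.Str.slice word (some (max 0 (j - n))) (some j)]) (by omega)]
      rw [PySem.List.pyRange_one_cons (show j < L + 1 by omega)]
      simp
    · simp only [extract_nchars_whileA]
      rw [if_neg h, PySem.List.pyRange_one_eq_nil (by omega)]
      simp

-- A's per-word processing equals its n-gram list gramsA
theorem whileA_eq_gramsA (word : String) (n : Int) (uni : Bool) (acc : List String) :
    extract_nchars_whileA word (PySem.Str.len word) n
        ((PySem.Str.len word + 1 - (if uni then 1 else min (PySem.Str.len word) n)).toNat)
        0 (if uni then 1 else min (PySem.Str.len word) n) acc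
      = acc ++ gramsA word n uni := by
  set L := PySem.Str.len word with hL
  unfold gramsA
  by_cases hu : uni = true
  · by_cases hn : n ≤ 0
    · simp only [hu, if_true]
      rw [whileA_flat word L n (L + 1 - 1).toNat 1 acc (by omega) (by omega), ← hL]
      congr 1
      apply List.map_congr_left
      intro e _
      simp [hn]
    · simp only [hu, if_true]
      have h := whileA_slide word L n (L + 1 - 1).toNat 1 acc (by omega)
      rw [show max 0 (1 - n) = 0 from by omega] at h
      rw [h, ← hL]
      congr 1
      apply List.map_congr_left
      intro e _
      simp [hn]
  · have hu' : uni = false := by simpa using hu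
    simp only [hu', Bool.false_eq_true, if_false]
    have h := whileA_slide word L n (L + 1 - min L n).toNat (min L n) acc (by omega)
    rw [show max 0 (min L n - n) = 0 from by omega] at h
    rw [h, ← hL]
    simp

-- the words produced by split() are nonempty (on the Chars side)
theorem split₀_go_ne_nil :
    ∀ (s cur : List Char) (acc : List (List Char)), (∀ w ∈ acc, w ≠ []) →
      ∀ w ∈ PySem.Chars.split₀.go s cur acc, w ≠ [] := by
  intro s
  induction s with
  | nil =>
    intro cur acc hacc w hw
    unfold PySem.Chars.split₀.go at hw
    split_ifs at hw with h
    · exact hacc w (by simpa using hw)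
    · simp only [List.mem_reverse, List.mem_cons] at hw
      rcases hw with hw | hw
      · subst hw
        simpa [List.isEmpty_iff] using h
      · exact hacc w hw
  | cons c rest ih =>
    intro cur acc hacc w hw
    unfold PySem.Chars.split₀.go at hw
    split_ifs at hw with h1 h2
    · exact ih [] acc hacc w hw
    · refine ih [] (cur.reverse :: acc) ?_ w hw
      intro w' hw'
      rcases List.mem_cons.mp hw' with hw' | hw'
      · subst hw'
        simpa [List.isEmpty_iff] using h2
      · exact hacc w' hw'
    · exact ih (c :: cur) acc hacc w hw

theorem mem_split₀_ne_empty (s w : String) (hw : w ∈ PySem.Str.split₀ s) : w.toList ≠ [] := by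
  have h : w.toList ∈ (PySem.Str.split₀ s).map String.toList := List.mem_map_of_mem hw
  rw [PySem.Str.split₀_map_toList] at h
  exact split₀_go_ne_nil s.toList [] [] (by simp) w.toList h

-- gramsA for a word coming from split() is nonempty
theorem gramsA_ne_nil (word : String) (n : Int) (uni : Bool) (hw : word.toList ≠ []) :
    gramsA word n uni ≠ [] := by
  unfold gramsA
  intro hcon
  have hlen := congrArg List.length hcon
  rw [List.length_map, PySem.List.length_pyRange_one] at hlen
  have hL : (1 : Int) ≤ PySem.Str.len word := by
    have : 0 < word.toList.length := List.length_pos_iff.mpr hw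
    simp only [PySem.Str.len_eq]
    exact_mod_cast this
  simp only [List.length_nil] at hlen
  split_ifs at hlen <;> omega

-- A's outer fold, flattened
theorem foldA_eq (n : Int) (uni : Bool) (fill : String) :
    ∀ (ws : List String) (acc : List String),
      ws.foldl (fun acc word =>
          (extract_nchars_whileA word (PySem.Str.len word) n
            ((PySem.Str.len word + 1 - (if uni then 1 else min (PySem.Str.len word) n)).toNat)
            0 (if uni then 1 else min (PySem.Str.len word) n) acc) ++ [fill]) acc
        = acc ++ ws.flatMap (fun w => gramsA w n uni ++ [fill]) := by
  intro ws
  induction ws with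
  | nil => intro acc; simp
  | cons w ws ih =>
    intro acc
    simp only [List.foldl_cons, List.flatMap_cons]
    rw [whileA_eq_gramsA, ih]
    simp

-- ---- B side: the streaming scan reaches the same per-word n-gram list ----

-- window start maintained by the stream, after e characters
def loAt (n : Int) (e : Nat) : Nat := if 0 < n then e - n.toNat else 0

-- the stream's buffer after e characters of ws
def bufAt (ws : List Char) (n : Int) (e : Nat) : List Char := (ws.take e).drop (loAt n e)

-- the stream's emitted flag after e characters (valid when uni or 0 < n)
def flagAt (uni : Bool) (n : Int) (e : Nat) : Bool :=
  if uni then decide (1 ≤ e) else decide (n ≤ (e : Int))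

-- the grams emitted during the first e characters (valid when uni or 0 < n)
def gramsUpTo (uni : Bool) (n : Int) (ws : List Char) (e : Nat) : List String :=
  (PySem.List.pyRange (if uni then 1 else n) ((e : Int) + 1) 1).map
    (fun j => String.ofList (bufAt ws n j.toNat))

theorem string_eq_ofList (s : String) (l : List Char) (h : s.toList = l) : String.ofList l = s := by
  rw [← h, String.ofList_toList]

-- invariant of Source B's character loop
theorem loAt_pos (n : Int) (hn : 0 < n) (e : Nat) : loAt n e = e - n.toNat := by
  simp [loAt, hn]

theorem loAt_nonpos (n : Int) (hn : ¬ 0 < n) (e : Nat) : loAt n e = 0 := by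
  simp [loAt, hn]

theorem stream_inv (n : Int) (uni : Bool) (H : uni = true ∨ 0 < n) (ws : List Char) :
    ∀ (e : Nat), e ≤ ws.length → ∀ (out₀ : List String),
      (ws.take e).foldl (extract_nchars_altStep n uni) (([] : List Char), false, out₀)
        = (bufAt ws n e, flagAt uni n e, out₀ ++ gramsUpTo uni n ws e) := by
  have hstart : (1 : Int) ≤ (if uni = true then 1 else n) := by
    by_cases hu : uni = true
    · rw [if_pos hu]
    · rw [if_neg hu]
      rcases H with hu' | hn
      · exact absurd hu' hu
      · omega
  intro e
  induction e with
  | zero =>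
    intro _ out₀
    have hz : gramsUpTo uni n ws 0 = [] := by
      unfold gramsUpTo
      rw [PySem.List.pyRange_one_eq_nil (by simpa using hstart)]
      simp
    have hflag : flagAt uni n 0 = false := by
      unfold flagAt
      by_cases hu : uni = true
      · rw [if_pos hu]; simp
      · rw [if_neg hu] at hstart ⊢
        simp
        omega
    rw [hz, hflag]
    simp [bufAt]
  | succ e ih =>
    intro he out₀
    have hx : e < ws.length := by omega
    have htake : ws.take (e + 1) = ws.take e ++ [ws[e]] := by
      rw [List.take_succ, List.getElem?_eq_getElem hx]
      rfl
    rw [htake, List.foldl_append, ih (by omega) out₀]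
    simp only [List.foldl_cons, List.foldl_nil]
    unfold extract_nchars_altStep
    simp only []
    have hlenT : (ws.take e).length = e := by rw [List.length_take]; omega
    have hlenT1 : (ws.take (e + 1)).length = e + 1 := by rw [List.length_take]; omega
    have hcast : ((e + 1 : Nat) : Int) = (e : Int) + 1 := by push_cast; ring
    have hgrow : ∀ (hstart' : (if uni = true then 1 else n) ≤ (e : Int) + 1),
        gramsUpTo uni n ws (e + 1) = gramsUpTo uni n ws e ++ [String.ofList (bufAt ws n (e + 1))] := by
      intro hstart'
      unfold gramsUpTo
      rw [hcast, PySem.List.pyRange_one_succ_right hstart', List.map_append]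
      simp only [List.map_cons, List.map_nil]
      congr 3 <;> omega
    by_cases hn : 0 < n
    · -- positive window size
      have hloE : loAt n e = e - n.toNat := loAt_pos n hn e
      have hloE1 : loAt n (e + 1) = e + 1 - n.toNat := loAt_pos n hn (e + 1)
      have hpre : bufAt ws n e ++ [ws[e]] = (ws.take (e + 1)).drop (loAt n e) := by
        unfold bufAt
        rw [htake, List.drop_append_of_le_length (by omega)]
      have hpre_len : (bufAt ws n e ++ [ws[e]]).length = e + 1 - loAt n e := by
        rw [hpre, List.length_drop, hlenT1]
      have hbuf : (if 0 < n ∧ n < ((bufAt ws n e ++ [ws[e]]).length : Int) then (bufAt ws n e ++ [ws[e]]).tail else bufAt ws n e ++ [ws[e]]) = bufAt ws n (e + 1) := by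
        by_cases hge : n.toNat ≤ e
        · rw [if_pos ⟨hn, by rw [hpre_len]; omega⟩, hpre, List.tail_drop]
          unfold bufAt
          rw [hloE1, hloE]
          congr 1
          omega
        · rw [if_neg (by rw [hpre_len]; intro ⟨_, hc⟩; omega), hpre]
          unfold bufAt
          rw [hloE1, hloE]
          congr 1
          omega
      rw [hbuf]
      have hbuf1_len : (bufAt ws n (e + 1)).length = e + 1 - loAt n (e + 1) := by
        unfold bufAt
        rw [List.length_drop, hlenT1]
      by_cases hu : uni = true
      · -- uni: always emit
        rw [if_pos (Or.inl hu)]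
        have hflag1 : flagAt uni n (e + 1) = true := by unfold flagAt; rw [if_pos hu]; simp
        rw [hflag1, hgrow (by rw [if_pos hu]; omega)]
        simp
      · by_cases hEe : n ≤ (e : Int) + 1
        · -- window just filled or sliding: emit
          rw [if_pos (Or.inr (by rw [hbuf1_len, hloE1]; omega))]
          have hflag1 : flagAt uni n (e + 1) = true := by
            unfold flagAt; rw [if_neg hu]
            simp
            push_cast
            omega
          rw [hflag1, hgrow (by rw [if_neg hu]; omega)]
          simp
        · -- window not yet filled: no emission
          rw [if_neg (by
            rw [hbuf1_len, hloE1]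
            intro hor
            rcases hor with hc | hc
            · exact hu hc
            · omega)]
          have hflag1 : flagAt uni n (e + 1) = flagAt uni n e := by
            unfold flagAt
            rw [if_neg hu, if_neg hu]
            have h1 : ¬ (n ≤ ((e + 1 : Nat) : Int)) := by push_cast; omega
            have h2 : ¬ (n ≤ (e : Int)) := by omega
            rw [decide_eq_false h1, decide_eq_false h2]
          have hgr : gramsUpTo uni n ws (e + 1) = gramsUpTo uni n ws e := by
            unfold gramsUpTo
            rw [if_neg hu, hcast,
                PySem.List.pyRange_one_eq_nil (by omega),
                PySem.List.pyRange_one_eq_nil (by omega)]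
          rw [hflag1, hgr]
    · -- n ≤ 0: the window never closes (only reachable with uni = true)
      have hu : uni = true := by
        rcases H with hu | hn'
        · exact hu
        · exact absurd hn' hn
      have hloE : loAt n e = 0 := loAt_nonpos n hn e
      have hloE1 : loAt n (e + 1) = 0 := loAt_nonpos n hn (e + 1)
      have hpre : bufAt ws n e ++ [ws[e]] = bufAt ws n (e + 1) := by
        unfold bufAt
        rw [hloE, hloE1, htake]
        simp
      have hbuf : (if 0 < n ∧ n < ((bufAt ws n e ++ [ws[e]]).length : Int) then (bufAt ws n e ++ [ws[e]]).tail else bufAt ws n e ++ [ws[e]]) = bufAt ws n (e + 1) := by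
        rw [if_neg (by intro ⟨hc, _⟩; exact hn hc), hpre]
      rw [hbuf, if_pos (Or.inl hu)]
      have hflag1 : flagAt uni n (e + 1) = true := by unfold flagAt; rw [if_pos hu]; simp
      rw [hflag1, hgrow (by rw [if_pos hu]; omega)]
      simp

-- each gram of the stream is the corresponding slice of A
theorem ofList_bufAt_eq_slice (word : String) (n : Int) (uni : Bool) (H : uni = true ∨ 0 < n)
    (j : Int) (h1 : 1 ≤ j) (hj : j ≤ (word.toList.length : Int)) :
    String.ofList (bufAt word.toList n j.toNat)
      = PySem.Str.slice word (some (if uni = true ∧ n ≤ 0 then 0 else max 0 (j - n))) (some j) := by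
  apply string_eq_ofList
  have hbridge : ∀ (a b : Int), (PySem.Str.slice word (some a) (some b)).toList = PySem.List.slice word.toList (some a) (some b) := by
    intro a b
    simp [PySem.Str.toList_slice]
  by_cases hn : 0 < n
  · have hlo : ¬ (uni = true ∧ n ≤ 0) := by intro ⟨_, hc⟩; omega
    rw [if_neg hlo, hbridge,
        PySem.List.slice_toNat word.toList (a := max 0 (j - n)) (b := j) (by omega) (by omega)]
    unfold bufAt
    rw [loAt_pos n hn, List.drop_take,
        show (max 0 (j - n)).toNat = j.toNat - n.toNat from by omega]
  · have hu : uni = true := by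
      rcases H with hu | hn'
      · exact hu
      · exact absurd hn' hn
    rw [if_pos ⟨hu, by omega⟩, hbridge,
        PySem.List.slice_toNat word.toList (a := 0) (b := j) (by omega) (by omega)]
    unfold bufAt
    rw [loAt_nonpos n hn]
    simp

-- Source B's per-word processing equals A's per-word n-gram list
theorem altWord_eq_gramsA (n : Int) (uni : Bool) (H : uni = true ∨ 0 < n) (fill : String)
    (word : String) (hw : word.toList ≠ []) (out : List String) :
    extract_nchars_altWord n uni fill out word
      = (if out.isEmpty then out else out ++ [fill]) ++ gramsA word n uni := by
  unfold extract_nchars_altWord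
  simp only []
  set out' := if out.isEmpty then out else out ++ [fill] with hout'
  set ws := word.toList with hws
  have hfold := stream_inv n uni H ws ws.length (le_refl _) out'
  rw [List.take_length] at hfold
  rw [hfold]
  have hL1 : 1 ≤ ws.length := by
    have : 0 < ws.length := List.length_pos_iff.mpr hw
    omega
  have hlen : PySem.Str.len word = (ws.length : Int) := by
    simp [PySem.Str.len_eq, hws]
  by_cases hu : uni = true
  · -- uni = true: emits every step, no fallback
    rw [if_neg (by rw [hu]; simp)]
    show out' ++ gramsUpTo uni n ws ws.length = out' ++ gramsA word n uni
    congr 1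
    unfold gramsUpTo gramsA
    rw [if_pos hu, if_pos hu, hlen]
    apply List.map_congr_left
    intro j hjmem
    rw [PySem.List.mem_pyRange_one] at hjmem
    obtain ⟨hj1, hj2⟩ := hjmem
    simp only [hws] at hj1 hj2
    exact ofList_bufAt_eq_slice word n uni H j (by omega) (by omega)
  · -- uni = false: 0 < n
    have hu' : uni = false := by simpa using hu
    have hn : 0 < n := by
      rcases H with hu'' | hn'
      · exact absurd hu'' hu
      · exact hn'
    by_cases hge : n ≤ (ws.length : Int)
    · -- window fills: no fallback, grams = pyRange n (L+1)
      have hflag : flagAt uni n ws.length = true := by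
        unfold flagAt
        rw [if_neg hu]
        simpa using hge
      rw [hflag, if_neg (by simp)]
      show out' ++ gramsUpTo uni n ws ws.length = out' ++ gramsA word n uni
      congr 1
      unfold gramsUpTo gramsA
      rw [if_neg hu, if_neg hu, hlen,
          show min (ws.length : Int) n = n from by omega]
      apply List.map_congr_left
      intro j hjmem
      rw [PySem.List.mem_pyRange_one] at hjmem
      obtain ⟨hj1, hj2⟩ := hjmem
      simp only [hws] at hj1 hj2
      exact ofList_bufAt_eq_slice word n uni H j (by omega) (by omega)
    · -- word shorter than the window: the fallback emits the whole word
      have hflag : flagAt uni n ws.length = false := by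
        unfold flagAt
        rw [if_neg hu]
        simpa using hge
      rw [hflag, if_pos ⟨hu', rfl⟩]
      have hgr : gramsUpTo uni n ws ws.length = [] := by
        unfold gramsUpTo
        rw [if_neg hu, PySem.List.pyRange_one_eq_nil (by omega)]
        simp
      have hbuf : bufAt ws n ws.length = ws := by
        unfold bufAt
        rw [loAt_pos n hn, List.take_length,
            show ws.length - n.toNat = 0 from by omega, List.drop_zero]
      have hga : gramsA word n uni = [String.ofList ws] := by
        unfold gramsA
        rw [if_neg hu, hlen,
            show min (ws.length : Int) n = (ws.length : Int) from by omega,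
            PySem.List.pyRange_one_singleton]
        simp only [List.map_cons, List.map_nil]
        rw [← ofList_bufAt_eq_slice word n uni H (ws.length : Int) (by omega) (by simp [hws])]
        rw [show ((ws.length : Int)).toNat = ws.length from by omega, hbuf]
      rw [hgr, hbuf, hga]
      simp

-- Source B's outer fold from a nonempty accumulator, flattened
theorem foldB_eq (n : Int) (uni : Bool) (H : uni = true ∨ 0 < n) (fill : String) :
    ∀ (ws : List String), (∀ w ∈ ws, w.toList ≠ []) → ∀ (acc : List String), acc ≠ [] →
      ws.foldl (extract_nchars_altWord n uni fill) acc
        = acc ++ ws.flatMap (fun w => fill :: gramsA w n uni) := by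
  intro ws
  induction ws with
  | nil => intro _ acc _; simp
  | cons w ws ih =>
    intro hwords acc hacc
    simp only [List.foldl_cons, List.flatMap_cons]
    rw [altWord_eq_gramsA n uni H fill w (hwords w List.mem_cons_self) acc]
    rw [if_neg (by simpa [List.isEmpty_iff] using hacc)]
    rw [ih (fun x hx => hwords x (List.mem_cons_of_mem _ hx)) _ (by simp)]
    simp

-- interleaving: fill after each block equals fill before each block, shifted
theorem flatMap_fill_shift (fill : String) (g : String → List String) :
    ∀ ws : List String, fill :: ws.flatMap (fun w => g w ++ [fill])
        = ws.flatMap (fun w => fill :: g w) ++ [fill] := by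
  intro ws
  induction ws with
  | nil => simp
  | cons w ws ih =>
    simp only [List.flatMap_cons, List.cons_append, List.append_assoc]
    rw [← ih]
    simp

-- A's full result for a nonempty word list
theorem extractA_eq (sentence : String) (n : Int) (uni : Bool) (fill : String)
    (w : String) (ws : List String) (hws : PySem.Str.split₀ sentence = w :: ws) :
    extract_nchars sentence n uni fill
      = gramsA w n uni ++ ws.flatMap (fun w => fill :: gramsA w n uni) := by
  unfold extract_nchars
  simp only []
  rw [hws]
  simp only [List.foldl_cons]
  rw [whileA_eq_gramsA, List.nil_append, foldA_eq]
  have hshift : (gramsA w n uni ++ [fill]) ++ ws.flatMap (fun w => gramsA w n uni ++ [fill])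
      = (gramsA w n uni ++ ws.flatMap (fun w => fill :: gramsA w n uni)) ++ [fill] := by
    simp only [List.append_assoc, List.singleton_append]
    rw [flatMap_fill_shift fill (fun w => gramsA w n uni) ws]
  rw [hshift]
  rw [show ((-1 : Int)) = -((1 : Nat) : Int) by norm_num,
      PySem.List.slice_to_neg_natCast _ 1 (by omega)]
  set Y := gramsA w n uni ++ ws.flatMap (fun w => fill :: gramsA w n uni) with hY
  have hlen : (Y ++ [fill]).length - 1 = Y.length := by
    rw [List.length_append]
    simp
  rw [hlen, List.take_left]

-- inside D (uni = false, n ≤ 0): Source B's stream never trims and never emits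
theorem streamD_inv (n : Int) (hn : ¬ 0 < n) (ws : List Char) :
    ∀ (e : Nat), e ≤ ws.length → ∀ (out₀ : List String),
      (ws.take e).foldl (extract_nchars_altStep n false) (([] : List Char), false, out₀)
        = (ws.take e, false, out₀) := by
  intro e
  induction e with
  | zero =>
    intro _ out₀
    simp
  | succ e ih =>
    intro he out₀
    have hx : e < ws.length := by omega
    have htake : ws.take (e + 1) = ws.take e ++ [ws[e]] := by
      rw [List.take_succ, List.getElem?_eq_getElem hx]
      rfl
    rw [htake, List.foldl_append, ih (by omega) out₀]
    simp only [List.foldl_cons, List.foldl_nil]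
    unfold extract_nchars_altStep
    simp only []
    have hlen : (ws.take e ++ [ws[e]]).length = e + 1 := by
      rw [List.length_append, List.length_take]
      simp
      omega
    have hc1 : ¬ (0 < n ∧ n < ((ws.take e ++ [ws[e]]).length : Int)) := fun h => hn h.1
    rw [if_neg hc1]
    have hc2 : ¬ (false = true ∨ ((ws.take e ++ [ws[e]]).length : Int) = n) := by
      rw [hlen]
      intro hor
      rcases hor with hc | hc
      · exact absurd hc (by simp)
      · omega
    rw [if_neg hc2]

-- inside D: each word contributes exactly itself
theorem altWordD (n : Int) (hn : ¬ 0 < n) (fill : String) (out : List String) (word : String) :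
    extract_nchars_altWord n false fill out word
      = (if out.isEmpty then out else out ++ [fill]) ++ [String.ofList word.toList] := by
  unfold extract_nchars_altWord
  simp only []
  have h := streamD_inv n hn word.toList word.toList.length (le_refl _)
      (if out.isEmpty then out else out ++ [fill])
  rw [List.take_length] at h
  rw [h]
  simp

-- inside D: Source B's outer fold, flattened
theorem foldBD (n : Int) (hn : ¬ 0 < n) (fill : String) :
    ∀ (ws : List String) (acc : List String), acc ≠ [] →
      ws.foldl (extract_nchars_altWord n false fill) acc
        = acc ++ ws.flatMap (fun w => [fill, String.ofList w.toList]) := by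
  intro ws
  induction ws with
  | nil => intro acc _; simp
  | cons w ws ih =>
    intro acc hacc
    simp only [List.foldl_cons, List.flatMap_cons]
    rw [altWordD n hn fill acc w,
        if_neg (by simpa [List.isEmpty_iff] using hacc),
        ih _ (by simp)]
    simp

-- inside D: A's per-word block has at least two grams
theorem gramsA_len_D (word : String) (hw : word.toList ≠ []) (n : Int) (hn : n ≤ 0) :
    2 ≤ (gramsA word n false).length := by
  unfold gramsA
  rw [List.length_map, PySem.List.length_pyRange_one]
  have hL : 1 ≤ word.toList.length := by
    have : 0 < word.toList.length := List.length_pos_iff.mpr hw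
    omega
  simp only [Bool.false_eq_true, if_false, PySem.Str.len_eq]
  rw [show min ((word.toList.length : Nat) : Int) n = n from by omega]
  omega

-- inside D: A's flattened tail is longer than B's by at least the word count
theorem flat_len_D (n : Int) (hn : n ≤ 0) (fill : String) :
    ∀ (ws : List String), (∀ w ∈ ws, w.toList ≠ []) →
      (ws.flatMap (fun w => [fill, String.ofList w.toList])).length + ws.length
        ≤ (ws.flatMap (fun w => fill :: gramsA w n false)).length := by
  intro ws
  induction ws with
  | nil => intro _; simp
  | cons w ws ih =>
    intro hws
    have hg := gramsA_len_D w (hws w List.mem_cons_self) n hn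
    have hr := ih (fun x hx => hws x (List.mem_cons_of_mem _ hx))
    simp only [List.flatMap_cons, List.length_append, List.length_cons, List.length_nil]
    omega

-- ===== VERDICT (by name: the statement is the Claim_ definition above) =====
theorem extract_nchars_spec : Claim_unchanged_extract_nchars := by
  intro sentence n uni fill _
  unfold Spec_extract_nchars
  intro hD
  rcases hws : PySem.Str.split₀ sentence with _ | ⟨w, ws⟩
  · unfold extract_nchars extract_nchars_alt
    simp only []
    rw [hws]
    simp only [List.foldl_nil]
    rw [show ((-1 : Int)) = -((1 : Nat) : Int) by norm_num,
        PySem.List.slice_to_neg_natCast _ 1 (by omega)]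
    simp
  · have H : uni = true ∨ 0 < n := by
      by_cases hu : uni = true
      · left; exact hu
      · right
        unfold D_extract_nchars at hD
        rw [hws] at hD
        push_neg at hD
        have hu' : uni = false := by simpa using hu
        by_contra hc
        have := hD hu' (by omega)
        simp at this
    have hwmem : w ∈ PySem.Str.split₀ sentence := by rw [hws]; exact List.mem_cons_self
    have hwne : w.toList ≠ [] := mem_split₀_ne_empty sentence w hwmem
    have hg : gramsA w n uni ≠ [] := gramsA_ne_nil w n uni hwne
    rw [extractA_eq sentence n uni fill w ws hws]
    unfold extract_nchars_alt
    rw [hws]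
    simp only [List.foldl_cons]
    rw [altWord_eq_gramsA n uni H fill w hwne []]
    rw [show (if ([] : List String).isEmpty = true then ([] : List String) else [] ++ [fill]) = [] from rfl,
        List.nil_append]
    rw [foldB_eq n uni H fill ws
      (fun x hx => mem_split₀_ne_empty sentence x (by rw [hws]; exact List.mem_cons_of_mem _ hx))
      (gramsA w n uni) hg]

theorem extract_nchars_changed : Claim_changed_extract_nchars := by
  unfold Claim_changed_extract_nchars
  decide

theorem extract_nchars_tight : Claim_exact_extract_nchars := by
  intro sentence n uni fill _ hD
  obtain ⟨hu, hn, hne⟩ := hD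
  subst hu
  rcases hws : PySem.Str.split₀ sentence with _ | ⟨w, ws⟩
  · exact absurd hws hne
  · have hwne : w.toList ≠ [] :=
      mem_split₀_ne_empty sentence w (by rw [hws]; exact List.mem_cons_self)
    rw [extractA_eq sentence n false fill w ws hws]
    unfold extract_nchars_alt
    rw [hws]
    simp only [List.foldl_cons]
    rw [altWordD n (by omega) fill [] w,
        show (if ([] : List String).isEmpty = true then ([] : List String) else [] ++ [fill]) = [] from rfl,
        List.nil_append,
        foldBD n (by omega) fill ws [String.ofList w.toList] (by simp)]
    intro heq
    have hlen := congrArg List.length heq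
    have hg := gramsA_len_D w hwne n hn
    have hflat := flat_len_D n hn fill ws
      (fun x hx => mem_split₀_ne_empty sentence x (by rw [hws]; exact List.mem_cons_of_mem _ hx))
    simp only [List.length_append, List.length_cons, List.length_nil] at hlen
    omega
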